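-- pv_equiv track=rewrite | github.com/csete-andor/ICEG64 | ICEG64/ai_decoder.py | pattern_searcher
-- ===== SOURCE A (Python) =====
-- def pattern_searcher(text):
--     # List of common English words to compare against
--     common_words = ['the', 'and', 'is', 'to', 'of', 'it', 'in', 'you', 'that']
--
--     # List of potential patterns to search for
--     patterns = ['aaaa', 'abab', 'aabb', 'abba']
--
--     # Loop through each pattern
--     for pattern in patterns:
--         decoded_text = ''
--         pattern_index = 0
--         word_list = text.split()
--
--         # Loop through each word in the text
--         for word in word_list:
--             decoded_word = ''
--
--             # Loop through each character in the word
--             for char in word: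
--                 # Check if the character matches the pattern
--                 if pattern[pattern_index % len(pattern)] == 'a':
--                     decoded_word += char.upper()
--                 else:
--                     decoded_word += char.lower()
--
--                 pattern_index += 1
--
--             # Add the decoded word to the decoded text
--             decoded_text += decoded_word + ' '
--
--         # Check if the decoded text contains common English words
--         if any(word in decoded_text.lower() for word in common_words):
--             return decoded_text.strip()
--
--     # Return the original text if no pattern is found
--     return text
-- ===== SOURCE B (Python) =====
-- def pattern_searcher(text):
--     # The membership test lowercases the decoded text, so every pattern makes the
--     # same decision and only the first ('aaaa', all-uppercase) result can be returned.
--     common_words = ['the', 'and', 'is', 'to', 'of', 'it', 'in', 'you', 'that']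
--     normalized = ' '.join(text.split())
--     if any(w in normalized.lower() for w in common_words):
--         return normalized.upper()
--     return text
-- ===== Notes on version B (the rewrite author's own statement) =====
-- stated objective: simpler
-- what changed: Replaced the three nested decode loops over four patterns with a single normalization: since the membership test lowercases the decoded text, every pattern yields the same decision and only the all-uppercase first pattern can be returned, so B joins text.split() once, tests the lowered join, and returns its upper().
import Mathlib
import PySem

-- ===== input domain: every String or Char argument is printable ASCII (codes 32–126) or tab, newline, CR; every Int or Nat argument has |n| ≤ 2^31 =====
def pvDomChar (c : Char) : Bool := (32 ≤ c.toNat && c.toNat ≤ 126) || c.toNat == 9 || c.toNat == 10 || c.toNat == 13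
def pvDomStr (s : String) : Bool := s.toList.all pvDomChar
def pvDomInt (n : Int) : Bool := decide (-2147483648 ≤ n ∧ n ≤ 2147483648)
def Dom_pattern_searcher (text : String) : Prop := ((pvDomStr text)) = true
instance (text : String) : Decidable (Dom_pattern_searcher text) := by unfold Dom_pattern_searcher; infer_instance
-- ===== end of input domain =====

-- B replaces A's three nested decode loops over four case patterns by one normalization +
-- uppercase, since the lowercased membership test decides identically for every pattern (objective: simpler).

-- ===== PORT A =====
-- common_words literal
def psCommonWords : List (List Char) :=
  ["the".toList, "and".toList, "is".toList, "to".toList, "of".toList,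
   "it".toList, "in".toList, "you".toList, "that".toList]

-- pattern[pattern_index % len(pattern)] == 'a' ? char.upper() : char.lower()
-- (the index is always in range because of the modulo, so .getD ' ' never supplies its default)
def psDecodeChar (pattern : List Char) (idx : Int) (c : Char) : Char :=
  if (PySem.List.pyGet? pattern (PySem.Int.mod idx (pattern.length : Int))).getD ' ' = 'a'
  then PySem.Chars.upperChar c else PySem.Chars.lowerChar c

-- the two inner loops: state = (decoded_text, pattern_index); per word an inner fold builds
-- (decoded_word, pattern_index) from ('', current index)
def psDecodeText (pattern : List Char) (words : List (List Char)) : List Char × Int :=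
  words.foldl (fun st w =>
    let dw := w.foldl (fun q c => (q.1 ++ [psDecodeChar pattern q.2 c], q.2 + 1))
      (([] : List Char), st.2)
    (st.1 ++ dw.1 ++ [' '], dw.2)) ([], 0)

-- any(word in decoded_text.lower() for word in common_words)
def psCond (dt : List Char) : Bool :=
  psCommonWords.any (fun w => PySem.Chars.isIn w (PySem.Chars.lower dt))

-- the outer 'for pattern in patterns' loop with its early return
def psLoop (text : String) : List (List Char) → String
  | [] => text
  | p :: rest =>
    let dt := (psDecodeText p (PySem.Chars.split₀ text.toList)).1
    if psCond dt then String.ofList (PySem.Chars.strip dt) else psLoop text rest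

def pattern_searcher (text : String) : String :=
  psLoop text ["aaaa".toList, "abab".toList, "aabb".toList, "abba".toList]

-- ===== PORT B =====
def psbCommonWords : List (List Char) :=
  ["the".toList, "and".toList, "is".toList, "to".toList, "of".toList,
   "it".toList, "in".toList, "you".toList, "that".toList]

def pattern_searcher_alt (text : String) : String :=
  let normalized := PySem.Chars.join [' '] (PySem.Chars.split₀ text.toList)
  if psbCommonWords.any (fun w => PySem.Chars.isIn w (PySem.Chars.lower normalized))
  then String.ofList (PySem.Chars.upper normalized) else text

-- ===== PRECONDITION & SPEC =====
def Spec_pattern_searcher (text : String) (out : String) : Prop := out = pattern_searcher_alt text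
instance (text : String) (out : String) : Decidable (Spec_pattern_searcher text out) := by unfold Spec_pattern_searcher; infer_instance

-- ===== CLAIM (what is proved, stated in full; the proofs are below) =====
def Claim_equal_pattern_searcher : Prop := ∀ (text : String), Dom_pattern_searcher text → Spec_pattern_searcher text (pattern_searcher text)

-- ===== LEMMAS AND PROOFS =====

-- character-level facts
theorem charLe (a b : Char) : a ≤ b ↔ a.toNat ≤ b.toNat := by
  rw [Char.le_def, Char.toNat, Char.toNat, UInt32.le_iff_toNat_le]

theorem toNat_ofNat' (n : Nat) (h : n < 55296) : (Char.ofNat n).toNat = n := by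
  rw [Char.toNat_ofNat]; simp [Nat.isValidChar, h]

theorem islower_iff (c : Char) : PySem.Chars.islower c = true ↔ 97 ≤ c.toNat ∧ c.toNat ≤ 122 := by
  simp only [PySem.Chars.islower, Bool.and_eq_true, decide_eq_true_eq, charLe,
    show ('a').toNat = 97 from by decide, show ('z').toNat = 122 from by decide]

theorem isupper_iff (c : Char) : PySem.Chars.isupper c = true ↔ 65 ≤ c.toNat ∧ c.toNat ≤ 90 := by
  simp only [PySem.Chars.isupper, Bool.and_eq_true, decide_eq_true_eq, charLe,
    show ('A').toNat = 65 from by decide, show ('Z').toNat = 90 from by decide]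

theorem lower_upperChar (c : Char) :
    PySem.Chars.lowerChar (PySem.Chars.upperChar c) = PySem.Chars.lowerChar c := by
  by_cases hl : PySem.Chars.islower c = true
  · have hb := (islower_iff c).mp hl
    have hlo : PySem.Chars.lowerChar c = c := by
      rw [PySem.Chars.lowerChar, if_neg]; rw [isupper_iff]; omega
    rw [PySem.Chars.upperChar, if_pos hl, hlo]
    have hu : (Char.ofNat (c.toNat - 32)).toNat = c.toNat - 32 := toNat_ofNat' _ (by omega)
    rw [PySem.Chars.lowerChar, if_pos (by rw [isupper_iff, hu]; omega)]
    rw [hu, show c.toNat - 32 + 32 = c.toNat from by omega, Char.ofNat_toNat]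
  · rw [PySem.Chars.upperChar, if_neg hl]

theorem lower_lowerChar (c : Char) :
    PySem.Chars.lowerChar (PySem.Chars.lowerChar c) = PySem.Chars.lowerChar c := by
  by_cases hu : PySem.Chars.isupper c = true
  · have hb := (isupper_iff c).mp hu
    have hlc : PySem.Chars.lowerChar c = Char.ofNat (c.toNat + 32) := by
      rw [PySem.Chars.lowerChar, if_pos hu]
    have h2 : (Char.ofNat (c.toNat + 32)).toNat = c.toNat + 32 := toNat_ofNat' _ (by omega)
    rw [hlc, PySem.Chars.lowerChar, if_neg]; rw [isupper_iff, h2]; omega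
  · have hlc : PySem.Chars.lowerChar c = c := by rw [PySem.Chars.lowerChar, if_neg hu]
    rw [hlc, hlc]

theorem isspace_of_alpha (c : Char) (h1 : 65 ≤ c.toNat) (h2 : c.toNat ≤ 122) :
    PySem.Chars.isspace c = false := by
  simp only [PySem.Chars.isspace, Bool.or_eq_false_iff, Bool.and_eq_false_iff,
    decide_eq_false_iff_not]
  omega

theorem isspace_upperChar (c : Char) :
    PySem.Chars.isspace (PySem.Chars.upperChar c) = PySem.Chars.isspace c := by
  by_cases hl : PySem.Chars.islower c = true
  · have hb := (islower_iff c).mp hl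
    rw [PySem.Chars.upperChar, if_pos hl]
    have hu : (Char.ofNat (c.toNat - 32)).toNat = c.toNat - 32 := toNat_ofNat' _ (by omega)
    rw [isspace_of_alpha _ (by omega) (by omega), isspace_of_alpha c (by omega) (by omega)]
  · rw [PySem.Chars.upperChar, if_neg hl]

-- words produced by split() are nonempty and whitespace-free
theorem split₀_go_words (s : List Char) : ∀ (cur : List Char) (acc : List (List Char)),
    (∀ c ∈ cur, PySem.Chars.isspace c = false) →
    (∀ w ∈ acc, w ≠ [] ∧ ∀ c ∈ w, PySem.Chars.isspace c = false) →
    ∀ w ∈ PySem.Chars.split₀.go s cur acc, w ≠ [] ∧ ∀ c ∈ w, PySem.Chars.isspace c = false := by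
  induction s with
  | nil =>
    intro cur acc hcur hacc w hw
    rw [PySem.Chars.split₀.go] at hw
    by_cases h : cur.isEmpty
    · rw [if_pos h, List.mem_reverse] at hw; exact hacc w hw
    · rw [if_neg h, List.mem_reverse, List.mem_cons] at hw
      rcases hw with rfl | hw
      · refine ⟨by simpa [List.isEmpty_iff] using h, ?_⟩
        intro c hc; exact hcur c (by simpa using hc)
      · exact hacc w hw
  | cons a s' ih =>
    intro cur acc hcur hacc w hw
    rw [PySem.Chars.split₀.go] at hw
    by_cases hsp : PySem.Chars.isspace a
    · rw [if_pos hsp] at hw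
      by_cases h : cur.isEmpty
      · rw [if_pos h] at hw; exact ih [] acc (by simp) hacc w hw
      · rw [if_neg h] at hw
        refine ih [] _ (by simp) ?_ w hw
        intro v hv
        rcases List.mem_cons.mp hv with rfl | hv
        · refine ⟨by simpa [List.isEmpty_iff] using h, ?_⟩
          intro c hc; exact hcur c (by simpa using hc)
        · exact hacc v hv
    · rw [if_neg hsp] at hw
      refine ih (a :: cur) acc ?_ hacc w hw
      intro c hc
      rcases List.mem_cons.mp hc with rfl | hc
      · simpa using hsp
      · exact hcur c hc

theorem split₀_words (s : List Char) :
    ∀ w ∈ PySem.Chars.split₀ s, w ≠ [] ∧ ∀ c ∈ w, PySem.Chars.isspace c = false :=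
  split₀_go_words s [] [] (by simp) (by simp)

-- intercalate helpers
theorem intercalate_cons₂ (v w : List Char) (vs : List (List Char)) :
    List.intercalate [' '] (v :: w :: vs) = v ++ [' '] ++ List.intercalate [' '] (w :: vs) := by
  simp [List.intercalate, List.intersperse]

theorem intercalate_snoc (vs : List (List Char)) (v : List Char) (h : vs ≠ []) :
    List.intercalate [' '] (vs ++ [v]) = List.intercalate [' '] vs ++ [' '] ++ v := by
  induction vs with
  | nil => simp at h
  | cons a tl ih =>
    cases tl with
    | nil => simp [List.intercalate, List.intersperse]
    | cons b tl' =>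
      rw [List.cons_append, List.cons_append, intercalate_cons₂, intercalate_cons₂,
        ← List.cons_append, ih (by simp)]
      simp

theorem intercalate_cons_decomp (v : List Char) (vs : List (List Char)) :
    ∃ R, List.intercalate [' '] (v :: vs) = v ++ R := by
  cases vs with
  | nil => exact ⟨[], by simp [List.intercalate]⟩
  | cons b tl => exact ⟨[' '] ++ List.intercalate [' '] (b :: tl), by rw [intercalate_cons₂]; simp⟩

theorem flat_join (vs : List (List Char)) (h : vs ≠ []) :
    (vs.map (fun w => w ++ [' '])).flatten = List.intercalate [' '] vs ++ [' '] := by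
  induction vs with
  | nil => simp at h
  | cons a tl ih =>
    cases tl with
    | nil => simp [List.intercalate, List.intersperse]
    | cons b tl' =>
      rw [List.map_cons, List.flatten_cons, ih (by simp), intercalate_cons₂]
      simp

theorem map_join (f : Char → Char) (hf : f ' ' = ' ') (vs : List (List Char)) :
    (List.intercalate [' '] vs).map f = List.intercalate [' '] (vs.map (List.map f)) := by
  induction vs with
  | nil => simp [List.intercalate]
  | cons a tl ih =>
    cases tl with
    | nil => simp [List.intercalate, List.intersperse]
    | cons b tl' =>
      simp only [List.map_cons] at ih
      rw [intercalate_cons₂, List.map_cons, List.map_cons, intercalate_cons₂, ← ih]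
      simp [hf]

-- strip facts
theorem strip_snoc_space (X : List Char) :
    PySem.Chars.strip (X ++ [' ']) = PySem.Chars.strip X := by
  rw [PySem.Chars.strip, PySem.Chars.strip, PySem.Chars.lstrip, PySem.Chars.lstrip]
  rw [List.dropWhile_append]
  by_cases h : (X.dropWhile PySem.Chars.isspace).isEmpty
  · rw [if_pos h]
    rw [List.isEmpty_iff] at h
    rw [h]
    decide
  · rw [if_neg h]
    rw [PySem.Chars.rstrip, PySem.Chars.rstrip, List.reverse_append]
    simp only [List.reverse_cons, List.reverse_nil, List.nil_append, List.singleton_append]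
    rw [List.dropWhile_cons, if_pos (by decide)]

theorem rstrip_snoc_word (Z v : List Char) (hv : v ≠ [])
    (hnsp : ∀ c ∈ v, PySem.Chars.isspace c = false) :
    PySem.Chars.rstrip (Z ++ v) = Z ++ v := by
  rw [PySem.Chars.rstrip, List.reverse_append]
  rcases List.exists_cons_of_ne_nil (by simpa using hv : v.reverse ≠ []) with ⟨c, t, hc⟩
  rw [hc, List.cons_append, List.dropWhile_cons, if_neg]
  · rw [← List.cons_append, ← hc, List.reverse_append, List.reverse_reverse, List.reverse_reverse]
  · have : c ∈ v := by
      rw [← List.mem_reverse, hc]; exact List.mem_cons_self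
    simp [hnsp c this]

theorem lstrip_cons_word (c : Char) (t : List Char) (h : PySem.Chars.isspace c = false) :
    PySem.Chars.lstrip (c :: t) = c :: t := by
  rw [PySem.Chars.lstrip, List.dropWhile_cons, if_neg (by simp [h])]

theorem strip_join (vs : List (List Char))
    (hv : ∀ w ∈ vs, w ≠ [] ∧ ∀ c ∈ w, PySem.Chars.isspace c = false) :
    PySem.Chars.strip (List.intercalate [' '] vs) = List.intercalate [' '] vs := by
  induction vs using List.reverseRecOn with
  | nil => simp [List.intercalate]; decide
  | append_singleton vs' v _ =>
    have hvv := hv v (by simp)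
    cases hvs' : vs' with
    | nil =>
      simp only [List.nil_append]
      have hJ : List.intercalate [' '] [v] = v := by simp [List.intercalate]
      rw [hJ, PySem.Chars.strip]
      obtain ⟨c, t, rfl⟩ := List.exists_cons_of_ne_nil hvv.1
      rw [lstrip_cons_word c t (hvv.2 c List.mem_cons_self)]
      exact rstrip_snoc_word [] _ (by simp) hvv.2
    | cons a tl =>
      rw [← hvs']
      have hne : vs' ≠ [] := by rw [hvs']; simp
      rw [intercalate_snoc vs' v hne, PySem.Chars.strip]
      have hav := hv a (by rw [hvs']; simp)
      obtain ⟨c, t, hct⟩ := List.exists_cons_of_ne_nil hav.1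
      obtain ⟨R, hR⟩ := intercalate_cons_decomp a tl
      rw [hvs'] at *
      rw [hR, hct]
      rw [List.append_assoc, List.append_assoc, List.cons_append]
      rw [lstrip_cons_word c _ (hav.2 c (by rw [hct]; exact List.mem_cons_self))]
      rw [← List.cons_append, ← hct, ← List.append_assoc, ← List.append_assoc]
      exact rstrip_snoc_word _ v hvv.1 hvv.2

-- substring with a trailing space
theorem isIn_snoc_space (w X : List Char) (hne : w ≠ []) (hsp : ' ' ∉ w) :
    PySem.Chars.isIn w (X ++ [' ']) = PySem.Chars.isIn w X := by
  cases hX : PySem.Chars.isIn w X with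
  | false =>
    rw [PySem.Chars.isIn_eq_false_iff] at hX
    rw [PySem.Chars.isIn_eq_false_iff]
    intro hinf
    apply hX
    obtain ⟨t, u, hh⟩ := hinf
    rcases List.eq_nil_or_concat u with rfl | ⟨u', x, rfl⟩
    · exfalso
      rw [List.append_nil] at hh
      have hw : w = w.dropLast ++ [w.getLast hne] := (List.dropLast_append_getLast hne).symm
      rw [hw, ← List.append_assoc] at hh
      have := (List.append_inj' hh (by simp)).2
      apply hsp
      have hlast : w.getLast hne = ' ' := by simpa using this
      rw [← hlast]; exact List.getLast_mem hne
    · refine ⟨t, u', ?_⟩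
      rw [List.concat_eq_append, ← List.append_assoc] at hh
      exact (List.append_inj' hh (by simp)).1
  | true =>
    rw [PySem.Chars.isIn_iff_infix] at hX
    rw [PySem.Chars.isIn_iff_infix]
    exact hX.trans (List.prefix_append X [' ']).isInfix

-- decoded text: lowered, it is pattern-independent
theorem lower_decodeChar (p : List Char) (i : Int) (c : Char) :
    PySem.Chars.lowerChar (psDecodeChar p i c) = PySem.Chars.lowerChar c := by
  rw [psDecodeChar]; split
  · exact lower_upperChar c
  · exact lower_lowerChar c

theorem inner_lower (p : List Char) (w : List Char) : ∀ (acc : List Char) (i : Int),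
    PySem.Chars.lower ((w.foldl (fun q c => (q.1 ++ [psDecodeChar p q.2 c], q.2 + 1)) (acc, i)).1)
      = PySem.Chars.lower acc ++ PySem.Chars.lower w := by
  induction w with
  | nil => intro acc i; simp [PySem.Chars.lower]
  | cons c w' ih =>
    intro acc i
    rw [List.foldl_cons, ih]
    simp [PySem.Chars.lower, lower_decodeChar]

theorem outer_lower (p : List Char) (ws : List (List Char)) : ∀ (acc : List Char) (i : Int),
    PySem.Chars.lower ((ws.foldl (fun st w =>
        let dw := w.foldl (fun q c => (q.1 ++ [psDecodeChar p q.2 c], q.2 + 1))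
          (([] : List Char), st.2)
        (st.1 ++ dw.1 ++ [' '], dw.2)) (acc, i)).1)
      = PySem.Chars.lower acc ++ (ws.map (fun w => PySem.Chars.lower w ++ [' '])).flatten := by
  induction ws with
  | nil => intro acc i; simp [PySem.Chars.lower]
  | cons w ws' ih =>
    intro acc i
    rw [List.foldl_cons]
    dsimp only
    rw [ih]
    have h1 := inner_lower p w [] i
    simp only [PySem.Chars.lower, List.map_append, List.map_nil, List.nil_append] at h1 ⊢
    rw [h1]
    simp only [List.append_assoc]
    congr 1
    simp
    decide

-- the first pattern upcases every character
theorem aaaa_char (i : Int) (c : Char) :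
    psDecodeChar "aaaa".toList i c = PySem.Chars.upperChar c := by
  have h0 : (0:Int) ≤ PySem.Int.mod i 4 := PySem.Int.mod_nonneg i (by norm_num)
  have h4 : PySem.Int.mod i 4 < 4 := PySem.Int.mod_lt i (by norm_num)
  rw [psDecodeChar, if_pos]
  have hlen : (("aaaa".toList.length : Nat) : Int) = 4 := by decide
  rw [hlen]
  have : PySem.Int.mod i 4 = 0 ∨ PySem.Int.mod i 4 = 1 ∨ PySem.Int.mod i 4 = 2 ∨
      PySem.Int.mod i 4 = 3 := by omega
  rcases this with h|h|h|h <;> rw [h] <;> decide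

theorem inner_aaaa (w : List Char) : ∀ (acc : List Char) (i : Int),
    ((w.foldl (fun q c => (q.1 ++ [psDecodeChar "aaaa".toList q.2 c], q.2 + 1)) (acc, i)).1)
      = acc ++ PySem.Chars.upper w := by
  induction w with
  | nil => intro acc i; simp [PySem.Chars.upper]
  | cons c w' ih =>
    intro acc i
    rw [List.foldl_cons, ih, aaaa_char]
    simp [PySem.Chars.upper]

theorem outer_aaaa (ws : List (List Char)) : ∀ (acc : List Char) (i : Int),
    ((ws.foldl (fun st w =>
        let dw := w.foldl (fun q c => (q.1 ++ [psDecodeChar "aaaa".toList q.2 c], q.2 + 1))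
          (([] : List Char), st.2)
        (st.1 ++ dw.1 ++ [' '], dw.2)) (acc, i)).1)
      = acc ++ (ws.map (fun w => PySem.Chars.upper w ++ [' '])).flatten := by
  induction ws with
  | nil => intro acc i; simp
  | cons w ws' ih =>
    intro acc i
    rw [List.foldl_cons]
    dsimp only
    rw [ih, inner_aaaa]
    simp

-- the decision is the same for every pattern and equals B's decision
theorem cond_eq' (ws : List (List Char)) (p : List Char) :
    psCond (psDecodeText p ws).1
      = psbCommonWords.any (fun w => PySem.Chars.isIn w
          (PySem.Chars.lower (PySem.Chars.join [' '] ws))) := by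
  have hlow : PySem.Chars.lower (psDecodeText p ws).1
      = ((ws.map PySem.Chars.lower).map (fun w => w ++ [' '])).flatten := by
    rw [psDecodeText, outer_lower]
    simp only [PySem.Chars.lower, List.map_nil, List.nil_append, List.map_map]
    rfl
  have hjoin : PySem.Chars.lower (PySem.Chars.join [' '] ws)
      = List.intercalate [' '] (ws.map PySem.Chars.lower) := by
    rw [PySem.Chars.join, PySem.Chars.lower, map_join PySem.Chars.lowerChar (by decide)]
    rfl
  rw [psCond, hlow, hjoin]
  cases ws with
  | nil => decide
  | cons a tl =>
    rw [flat_join _ (by simp)]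
    simp only [psCommonWords, psbCommonWords, List.any_cons, List.any_nil]
    rw [isIn_snoc_space _ _ (by decide) (by decide), isIn_snoc_space _ _ (by decide) (by decide),
      isIn_snoc_space _ _ (by decide) (by decide), isIn_snoc_space _ _ (by decide) (by decide),
      isIn_snoc_space _ _ (by decide) (by decide), isIn_snoc_space _ _ (by decide) (by decide),
      isIn_snoc_space _ _ (by decide) (by decide), isIn_snoc_space _ _ (by decide) (by decide),
      isIn_snoc_space _ _ (by decide) (by decide)]

theorem cond_eq (text : String) (p : List Char) :
    psCond (psDecodeText p (PySem.Chars.split₀ text.toList)).1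
      = psbCommonWords.any (fun w => PySem.Chars.isIn w
          (PySem.Chars.lower (PySem.Chars.join [' '] (PySem.Chars.split₀ text.toList)))) :=
  cond_eq' (PySem.Chars.split₀ text.toList) p

-- the first pattern's stripped result is B's uppercased normalization
theorem result_eq' (ws : List (List Char))
    (hw : ∀ w ∈ ws, w ≠ [] ∧ ∀ c ∈ w, PySem.Chars.isspace c = false) :
    PySem.Chars.strip (psDecodeText "aaaa".toList ws).1
      = PySem.Chars.upper (PySem.Chars.join [' '] ws) := by
  have hup : PySem.Chars.upper (PySem.Chars.join [' '] ws)
      = List.intercalate [' '] (ws.map PySem.Chars.upper) := by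
    rw [PySem.Chars.join, PySem.Chars.upper, map_join PySem.Chars.upperChar (by decide)]
    rfl
  have hdt : (psDecodeText "aaaa".toList ws).1
      = ((ws.map PySem.Chars.upper).map (fun w => w ++ [' '])).flatten := by
    rw [psDecodeText, outer_aaaa]
    simp only [List.nil_append, List.map_map]
    rfl
  rw [hdt, hup]
  cases ws with
  | nil => decide
  | cons a tl =>
    rw [flat_join _ (by simp), strip_snoc_space, strip_join]
    intro w hwmem
    rw [List.mem_map] at hwmem
    obtain ⟨v, hvmem, rfl⟩ := hwmem
    have hv := hw v hvmem
    refine ⟨by simpa [PySem.Chars.upper] using hv.1, ?_⟩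
    intro c hc
    rw [PySem.Chars.upper, List.mem_map] at hc
    obtain ⟨d, hd, rfl⟩ := hc
    rw [isspace_upperChar]
    exact hv.2 d hd

theorem result_eq (text : String) :
    PySem.Chars.strip (psDecodeText "aaaa".toList (PySem.Chars.split₀ text.toList)).1
      = PySem.Chars.upper (PySem.Chars.join [' '] (PySem.Chars.split₀ text.toList)) :=
  result_eq' _ (split₀_words text.toList)

-- ===== VERDICT (by name: the statement is the Claim_ definition above) =====
theorem pattern_searcher_spec : Claim_equal_pattern_searcher := by
  intro text _
  simp only [Spec_pattern_searcher, pattern_searcher, pattern_searcher_alt, psLoop]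
  rw [cond_eq text, cond_eq text, cond_eq text, cond_eq text]
  by_cases hb : psbCommonWords.any (fun w => PySem.Chars.isIn w
      (PySem.Chars.lower (PySem.Chars.join [' '] (PySem.Chars.split₀ text.toList)))) = true
  · simp only [hb, if_true, result_eq text]
  · simp only [Bool.not_eq_true] at hb
    simp only [hb, if_false, Bool.false_eq_true]
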